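-- pv_equiv track=rewrite | github.com/romainpasquier/Cryptage-Decryptage-d-images | TIPE/cryptimg/cryptimg.py | RGBrotationForward
-- ===== SOURCE A (Python) =====
-- def RGBrotationForward(rotationP, pixels):
--     newpix = []
--     lastpix = []
--     delindex = []
--     for x in range(len(pixels)%3):
--         lastpix.append(pixels[(len(pixels)-len(pixels)%3)+x])
--         delindex.append((len(pixels)-len(pixels)%3)+x)
--
--     for x in range(len(delindex)):
--         pixels.pop(delindex[len(delindex)-x-1])
--     if rotationP == 0:
--         for x in range(int(len(pixels)/3)):
--             newpix.append(pixels[x*3])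
--             newpix.append([pixels[x*3+1][2], pixels[x*3+1][0], pixels[x*3+1][1]])
--             newpix.append([pixels[x*3+2][1], pixels[x*3+2][2], pixels[x*3+2][0]])
--     elif rotationP == 1:
--         for x in range(int(len(pixels)/3)):
--             newpix.append([pixels[x*3][1], pixels[x*3][2], pixels[x*3][0]])
--             newpix.append(pixels[x*3+1])
--             newpix.append([pixels[x*3+2][2], pixels[x*3+2][0], pixels[x*3+2][1]])
--     elif rotationP == 2:
--         for x in range(int(len(pixels)/3)):
--             newpix.append([pixels[x*3][2], pixels[x*3][0], pixels[x*3][1]])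
--             newpix.append([pixels[x*3+1][1], pixels[x*3+1][2], pixels[x*3+1][0]])
--             newpix.append(pixels[x*3+2])
--     else:
--         newpix = pixels
--
--     for x in range(len(lastpix)):
--         newpix.append(lastpix[x])
--     return newpix
-- ===== SOURCE B (Python) =====
-- def RGBrotationForward(rotationP, pixels):
--     # Deinterleave / rotate / reinterleave: split the complete groups of three into
--     # the three strided sub-lists pixels[0::3], pixels[1::3], pixels[2::3]; each
--     # sub-list gets ONE fixed channel permutation (chosen once from rotationP);
--     # then zip the three rotated streams back together.
--     r = len(pixels) % 3
--     lastpix = pixels[len(pixels) - r:]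
--     del pixels[len(pixels) - r:]          # same in-place truncation as the original
--     if rotationP in (0, 1, 2):
--         perms = [lambda p: p,
--                  lambda p: [p[2], p[0], p[1]],
--                  lambda p: [p[1], p[2], p[0]]]
--         rotated = [[perms[(j - rotationP) % 3](p) for p in pixels[j::3]]
--                    for j in range(3)]
--         out = [pix for trip in zip(rotated[0], rotated[1], rotated[2]) for pix in trip]
--     else:
--         out = pixels
--     out.extend(lastpix)
--     return out
-- ===== Notes on version B (the rewrite author's own statement) =====
-- stated objective: alternative
-- what changed: Instead of A's index-bookkeeping truncation (delindex + pop loop) and three separate group-of-3 loops (one per rotationP value, three indexed appends each), B deinterleaves the complete groups into the three strided sub-lists pixels[0::3], pixels[1::3], pixels[2::3], applies one fixed channel permutation to each whole sub-list, and zips the three streams back together.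
import Mathlib
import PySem

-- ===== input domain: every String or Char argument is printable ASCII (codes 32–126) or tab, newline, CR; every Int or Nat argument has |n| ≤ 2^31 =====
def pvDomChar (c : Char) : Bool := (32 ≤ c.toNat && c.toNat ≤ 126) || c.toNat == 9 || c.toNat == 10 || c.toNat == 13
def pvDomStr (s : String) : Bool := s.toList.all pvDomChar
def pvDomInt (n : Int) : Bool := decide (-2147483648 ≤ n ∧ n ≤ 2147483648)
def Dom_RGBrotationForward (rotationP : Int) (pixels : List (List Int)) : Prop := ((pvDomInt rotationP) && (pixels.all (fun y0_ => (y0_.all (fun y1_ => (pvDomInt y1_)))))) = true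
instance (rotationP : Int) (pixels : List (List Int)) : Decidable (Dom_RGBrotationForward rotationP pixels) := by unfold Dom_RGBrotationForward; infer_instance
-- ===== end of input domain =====

-- B deinterleaves the complete groups of three into the strided sub-lists pixels[0::3],
-- pixels[1::3], pixels[2::3], permutes each whole sub-list with one fixed channel permutation
-- and zips the streams back together (objective: alternative). Both Pythons truncate the
-- argument list in place the same way; the equivalence proved here is about the return value.

-- ===== PORT A =====
-- 'int(len(px)/3)' (float division then truncation) equals len(px) // 3 for any realizable list
-- length; ported as Nat division. The pop of delindex[...] is always in range, so the 'none'
-- branch of pop? (Python would raise there) is unreachable.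
def RGBrotationForward (rotationP : Int) (pixels : List (List Int)) : List (List Int) :=
  let n : Int := pixels.length
  let lp := (PySem.List.pyRange 0 (PySem.Int.mod n 3) 1).foldl
      (fun (st : List (List Int) × List Int) x =>
        (st.1 ++ [PySem.List.pyGetD pixels (n - PySem.Int.mod n 3 + x) []],
         st.2 ++ [n - PySem.Int.mod n 3 + x])) ([], [])
  let lastpix := lp.1
  let delindex := lp.2
  let px := (PySem.List.pyRange 0 (delindex.length : Int) 1).foldl
      (fun cur x =>
        match PySem.List.pop? cur (PySem.List.pyGetD delindex ((delindex.length : Int) - x - 1) 0) with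
        | some r => r.2
        | none => cur)
      pixels
  let newpix : List (List Int) :=
    if rotationP = 0 then
      (PySem.List.pyRange 0 ((px.length / 3 : Nat) : Int) 1).foldl
        (fun acc x =>
          acc ++ [PySem.List.pyGetD px (x*3) []]
              ++ [[PySem.List.pyGetD (PySem.List.pyGetD px (x*3+1) []) 2 0,
                   PySem.List.pyGetD (PySem.List.pyGetD px (x*3+1) []) 0 0,
                   PySem.List.pyGetD (PySem.List.pyGetD px (x*3+1) []) 1 0]]
              ++ [[PySem.List.pyGetD (PySem.List.pyGetD px (x*3+2) []) 1 0,
                   PySem.List.pyGetD (PySem.List.pyGetD px (x*3+2) []) 2 0,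
                   PySem.List.pyGetD (PySem.List.pyGetD px (x*3+2) []) 0 0]]) []
    else if rotationP = 1 then
      (PySem.List.pyRange 0 ((px.length / 3 : Nat) : Int) 1).foldl
        (fun acc x =>
          acc ++ [[PySem.List.pyGetD (PySem.List.pyGetD px (x*3) []) 1 0,
                   PySem.List.pyGetD (PySem.List.pyGetD px (x*3) []) 2 0,
                   PySem.List.pyGetD (PySem.List.pyGetD px (x*3) []) 0 0]]
              ++ [PySem.List.pyGetD px (x*3+1) []]
              ++ [[PySem.List.pyGetD (PySem.List.pyGetD px (x*3+2) []) 2 0,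
                   PySem.List.pyGetD (PySem.List.pyGetD px (x*3+2) []) 0 0,
                   PySem.List.pyGetD (PySem.List.pyGetD px (x*3+2) []) 1 0]]) []
    else if rotationP = 2 then
      (PySem.List.pyRange 0 ((px.length / 3 : Nat) : Int) 1).foldl
        (fun acc x =>
          acc ++ [[PySem.List.pyGetD (PySem.List.pyGetD px (x*3) []) 2 0,
                   PySem.List.pyGetD (PySem.List.pyGetD px (x*3) []) 0 0,
                   PySem.List.pyGetD (PySem.List.pyGetD px (x*3) []) 1 0]]
              ++ [[PySem.List.pyGetD (PySem.List.pyGetD px (x*3+1) []) 1 0,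
                   PySem.List.pyGetD (PySem.List.pyGetD px (x*3+1) []) 2 0,
                   PySem.List.pyGetD (PySem.List.pyGetD px (x*3+1) []) 0 0]]
              ++ [PySem.List.pyGetD px (x*3+2) []]) []
    else px
  (PySem.List.pyRange 0 (lastpix.length : Int) 1).foldl
    (fun acc x => acc ++ [PySem.List.pyGetD lastpix x []]) newpix

-- ===== PORT B =====
-- perms[amount] of Source B: the channel permutation picked for a whole strided sub-list
def pvPerm (amount : Int) (p : List Int) : List Int :=
  if amount = 0 then p
  else if amount = 1 then
    [PySem.List.pyGetD p 2 0, PySem.List.pyGetD p 0 0, PySem.List.pyGetD p 1 0]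
  else
    [PySem.List.pyGetD p 1 0, PySem.List.pyGetD p 2 0, PySem.List.pyGetD p 0 0]

def RGBrotationForward_alt (rotationP : Int) (pixels : List (List Int)) : List (List Int) :=
  let n : Int := pixels.length
  let r := PySem.Int.mod n 3
  let lastpix := PySem.List.slice pixels (some (n - r)) none
  let kept := PySem.List.slice pixels none (some (n - r))
  let out : List (List Int) :=
    if rotationP = 0 ∨ rotationP = 1 ∨ rotationP = 2 then
      let rotated := (PySem.List.pyRange 0 3).map (fun j =>
        ((PySem.List.slice? kept (some j) none 3).getD []).map
          (pvPerm (PySem.Int.mod (j - rotationP) 3)))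
      ((rotated.getD 0 []).zip ((rotated.getD 1 []).zip (rotated.getD 2 []))).flatMap
        (fun t => [t.1, t.2.1, t.2.2])
    else kept
  out ++ lastpix

-- ===== PRECONDITION & SPEC =====
-- Pre_ excludes exactly the inputs where A raises an IndexError: rotationP in {0,1,2} and some
-- pixel at a rotated position (index i in a complete group of 3 with i % 3 ≠ rotationP) has
-- fewer than 3 channels.  (B raises there too.)
def Pre_RGBrotationForward (rotationP : Int) (pixels : List (List Int)) : Prop :=
  (rotationP = 0 ∨ rotationP = 1 ∨ rotationP = 2) →
    ∀ i : Nat, i < pixels.length - pixels.length % 3 → ((i % 3 : Nat) : Int) ≠ rotationP →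
      3 ≤ (pixels.getD i []).length
instance (rotationP : Int) (pixels : List (List Int)) : Decidable (Pre_RGBrotationForward rotationP pixels) := by
  unfold Pre_RGBrotationForward; infer_instance
def pvWitness_RGBrotationForward : Int × List (List Int) :=
  (0, [[1, 2, 3], [4, 5, 6], [7, 8, 9], [10, 11, 12]])
def Spec_RGBrotationForward (rotationP : Int) (pixels : List (List Int)) (out : List (List Int)) : Prop := out = RGBrotationForward_alt rotationP pixels
instance (rotationP : Int) (pixels : List (List Int)) (out : List (List Int)) : Decidable (Spec_RGBrotationForward rotationP pixels out) := by unfold Spec_RGBrotationForward; infer_instance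

-- ===== CLAIM (what is proved, stated in full; the proofs are below) =====
def Claim_equal_RGBrotationForward : Prop := ∀ (rotationP : Int) (pixels : List (List Int)), Dom_RGBrotationForward rotationP pixels → Pre_RGBrotationForward rotationP pixels → Spec_RGBrotationForward rotationP pixels (RGBrotationForward rotationP pixels)

-- ===== LEMMAS AND PROOFS =====

-- python mod of a nonnegative cast by 3
theorem pvModCast (n : Nat) : PySem.Int.mod (n : Int) 3 = ((n % 3 : Nat) : Int) := by
  rw [PySem.Int.mod_eq_emod_of_pos (by norm_num)]
  omega

-- reading a suffix element by element is List.drop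
theorem pvMapRangeGetD {A : Type} (px : List A) (a : Nat) (d : A) :
    (List.range (px.length - a)).map (fun k => px.getD (a + k) d) = px.drop a := by
  apply List.ext_getElem
  · simp
  · intro i h1 h2
    simp only [List.getElem_map, List.getElem_range, List.getElem_drop]
    simp only [List.length_map, List.length_range] at h1
    simp only [List.length_drop] at h2
    rw [List.getD_eq_getElem px d (by omega)]

-- popping the last element r times is List.take
theorem pvPopFold {A : Type} (px : List A) (r : Nat) (h : r ≤ px.length) :
    (List.range r).foldl
      (fun cur k =>
        match PySem.List.pop? cur (((px.length - 1 - k : Nat) : Int)) with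
        | some p => p.2
        | none => cur) px = px.take (px.length - r) := by
  induction r with
  | zero => simp
  | succ k ih =>
    rw [List.range_succ, List.foldl_append, ih (by omega)]
    simp only [List.foldl_cons, List.foldl_nil]
    have hlen : (px.take (px.length - k)).length = px.length - k := by
      simp
    have hidx : px.length - 1 - k < (px.take (px.length - k)).length := by omega
    rw [PySem.List.pop?_natCast _ _ hidx]
    simp only []
    rw [List.eraseIdx_eq_take_drop_succ]
    rw [List.take_take, List.drop_take]
    have h1 : px.length - 1 - k + 1 = px.length - k := by omega
    have h2 : min (px.length - 1 - k) (px.length - k) = px.length - 1 - k := by omega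
    rw [h1, h2]
    simp [Nat.sub_sub]
    omega

theorem pvAppendLoop (newpix last : List (List Int)) :
    List.foldl (fun acc x => acc ++ [PySem.List.pyGetD last x []]) newpix
      (PySem.List.pyRange 0 (last.length : Int)) = newpix ++ last := by
  rw [PySem.List.pyRange_one, List.foldl_map]
  rw [PySem.List.foldl_congr_mem _ _ (fun acc k => acc ++ [last.getD k []]) _
      (by intro acc k hk; simp [PySem.List.pyGetD_natCast])]
  rw [PySem.List.foldl_append_singleton_eq_map]
  congr 1
  simpa using pvMapRangeGetD last 0 []

theorem pvPairLoop (pixels : List (List Int)) :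
    (PySem.List.pyRange 0 (PySem.Int.mod (pixels.length : Int) 3)).foldl
      (fun (st : List (List Int) × List Int) x =>
        (st.1 ++ [PySem.List.pyGetD pixels ((pixels.length : Int) - PySem.Int.mod (pixels.length : Int) 3 + x) []],
         st.2 ++ [(pixels.length : Int) - PySem.Int.mod (pixels.length : Int) 3 + x])) ([], []) =
    (pixels.drop (pixels.length - pixels.length % 3),
     (List.range (pixels.length % 3)).map (fun k => ((pixels.length - pixels.length % 3 + k : Nat) : Int))) := by
  rw [PySem.List.foldl_prod_mk
      (f := fun acc x => acc ++ [PySem.List.pyGetD pixels ((pixels.length : Int) - PySem.Int.mod (pixels.length : Int) 3 + x) []])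
      (g := fun acc x => acc ++ [(pixels.length : Int) - PySem.Int.mod (pixels.length : Int) 3 + x])]
  rw [PySem.List.foldl_append_singleton_eq_map, PySem.List.foldl_append_singleton_eq_map]
  rw [pvModCast, PySem.List.pyRange_one]
  have hr : pixels.length % 3 ≤ pixels.length := Nat.mod_le _ _
  have hto : ((pixels.length % 3 : Nat) : Int) - 0 = ((pixels.length % 3 : Nat) : Int) := by ring
  rw [hto]
  simp only [Int.toNat_natCast, List.map_map, List.nil_append]
  have hlen : pixels.length - (pixels.length - pixels.length % 3) = pixels.length % 3 := by omega
  refine Prod.ext ?_ ?_ <;> dsimp only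
  · rw [List.map_congr_left
        (h := fun k hk => by
          simp only [List.mem_range] at hk
          show PySem.List.pyGetD pixels ((pixels.length : Int) - ((pixels.length % 3 : Nat) : Int) + (0 + (k : Int))) [] = pixels.getD (pixels.length - pixels.length % 3 + k) []
          have e : (pixels.length : Int) - ((pixels.length % 3 : Nat) : Int) + (0 + (k : Int)) = ((pixels.length - pixels.length % 3 + k : Nat) : Int) := by omega
          rw [e, PySem.List.pyGetD_natCast])]
    have h := pvMapRangeGetD pixels (pixels.length - pixels.length % 3) []
    rw [hlen] at h
    exact h
  · exact List.map_congr_left (fun k hk => by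
      simp only [List.mem_range] at hk
      show (pixels.length : Int) - ((pixels.length % 3 : Nat) : Int) + (0 + (k : Int)) = _
      omega)

-- L2: the pop loop deletes the trailing remainder
theorem pvPopLoop (pixels : List (List Int)) :
    List.foldl
      (fun cur x =>
        match PySem.List.pop? cur
            (PySem.List.pyGetD
              ((List.range (pixels.length % 3)).map (fun k => ((pixels.length - pixels.length % 3 + k : Nat) : Int)))
              ((((List.range (pixels.length % 3)).map (fun k => ((pixels.length - pixels.length % 3 + k : Nat) : Int))).length : Int) - x - 1) 0) with
        | some r => r.2
        | none => cur)
      pixels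
      (PySem.List.pyRange 0 ((((List.range (pixels.length % 3)).map (fun k => ((pixels.length - pixels.length % 3 + k : Nat) : Int))).length : Int))) =
    pixels.take (pixels.length - pixels.length % 3) := by
  have hr : pixels.length % 3 ≤ pixels.length := Nat.mod_le _ _
  simp only [List.length_map, List.length_range]
  rw [PySem.List.pyRange_one]
  have hto : ((pixels.length % 3 : Nat) : Int) - 0 = ((pixels.length % 3 : Nat) : Int) := by ring
  rw [hto]
  simp only [Int.toNat_natCast]
  rw [List.foldl_map]
  rw [PySem.List.foldl_congr_mem _ _
      (fun cur k =>
        match PySem.List.pop? cur (((pixels.length - 1 - k : Nat) : Int)) with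
        | some p => p.2
        | none => cur) _
      (by
        intro cur k hk
        simp only [List.mem_range] at hk
        have e1 : ((pixels.length % 3 : Nat) : Int) - (0 + (k : Int)) - 1 = ((pixels.length % 3 - 1 - k : Nat) : Int) := by omega
        rw [e1, PySem.List.pyGetD_natCast]
        rw [PySem.List.getD_map_range _ _ _ _ (by omega)]
        have e2 : ((pixels.length - pixels.length % 3 + (pixels.length % 3 - 1 - k) : Nat) : Int) = ((pixels.length - 1 - k : Nat) : Int) := by omega
        rw [e2])]
  convert pvPopFold pixels (pixels.length % 3) hr using 2
  funext cur k
  cases PySem.List.pop? cur (((pixels.length - 1 - k : Nat) : Int)) <;> rfl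

theorem pvSliceFrom (pixels : List (List Int)) :
    PySem.List.slice pixels (some ((pixels.length : Int) - PySem.Int.mod (pixels.length : Int) 3)) none =
      pixels.drop (pixels.length - pixels.length % 3) := by
  rw [pvModCast]
  have e : (pixels.length : Int) - ((pixels.length % 3 : Nat) : Int) = ((pixels.length - pixels.length % 3 : Nat) : Int) := by omega
  rw [e, PySem.List.slice_from_natCast]

theorem pvSliceTo (pixels : List (List Int)) :
    PySem.List.slice pixels none (some ((pixels.length : Int) - PySem.Int.mod (pixels.length : Int) 3)) =
      pixels.take (pixels.length - pixels.length % 3) := by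
  rw [pvModCast]
  have e : (pixels.length : Int) - ((pixels.length % 3 : Nat) : Int) = ((pixels.length - pixels.length % 3 : Nat) : Int) := by omega
  rw [e, PySem.List.slice_to_natCast]

-- every third element, starting at the head (proof-side characterisation of xs[j::3])
def pvSNth {A : Type} : List A → List A
  | [] => []
  | [a] => [a]
  | [a, _] => [a]
  | a :: _ :: _ :: l => a :: pvSNth l

-- common shape of both sides: one group of three at a time
def pvChunk3 (f g h : List Int → List Int) : List (List Int) → List (List Int)
  | a :: b :: c :: rest => f a :: g b :: h c :: pvChunk3 f g h rest
  | _ => []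

-- reading every third element of ys by index is pvSNth ys
theorem pvCore {A : Type} (ys : List A) :
    List.filterMap (fun k => ys[3 * k]?) (List.range ((ys.length + 2) / 3)) = pvSNth ys := by
  induction ys using pvSNth.induct with
  | case1 => simp [pvSNth]
  | case2 a => simp [pvSNth, List.range_succ]
  | case3 a b => simp [pvSNth, List.range_succ]
  | case4 a b c l ih =>
    have hcnt : ((a :: b :: c :: l).length + 2) / 3 = (l.length + 2) / 3 + 1 := by
      simp only [List.length_cons]; omega
    rw [hcnt, List.range_succ_eq_map, List.filterMap_cons]
    simp only [Nat.mul_zero, List.getElem?_cons_zero, List.filterMap_map]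
    show _ = pvSNth (a :: b :: c :: l)
    simp only [pvSNth]
    refine congrArg (List.cons a) ?_
    rw [← ih]
    apply List.filterMap_congr
    intro k _
    show (a :: b :: c :: l)[3 * (k + 1)]? = l[3 * k]?
    have e : 3 * (k + 1) = ((3 * k + 1) + 1) + 1 := by omega
    rw [e, List.getElem?_cons_succ, List.getElem?_cons_succ, List.getElem?_cons_succ]

-- xs[j::3] (a non-negative start, no stop, step 3) is pvSNth (xs.drop j)
theorem pvSlice3 {A : Type} (xs : List A) (j : Nat) :
    PySem.List.slice? xs (some (j : Int)) none 3 = some (pvSNth (xs.drop j)) := by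
  simp only [PySem.List.slice?, PySem.List.sliceIndices]
  norm_num
  have hj : ¬ ((j : Int) < 0) := by omega
  simp only [hj, if_false]
  have hmin : min (j : Int) (xs.length : Int) = ((min j xs.length : Nat) : Int) := by omega
  rw [hmin]
  have hmle : min j xs.length ≤ xs.length := by omega
  have hdrop : xs.drop (min j xs.length) = xs.drop j := by
    by_cases h : j ≤ xs.length
    · rw [min_eq_left h]
    · rw [min_eq_right (by omega), List.drop_of_length_le (by omega),
          List.drop_of_length_le (by omega)]
  have hcnt : (if ((min j xs.length : Nat) : Int) < (xs.length : Int) then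
        (((xs.length : Int) - ((min j xs.length : Nat) : Int) + 3 - 1) / 3).toNat else 0)
      = ((xs.drop (min j xs.length)).length + 2) / 3 := by
    rw [List.length_drop]
    by_cases h : min j xs.length < xs.length
    · rw [if_pos (by exact_mod_cast h)]; omega
    · rw [if_neg (by exact_mod_cast h)]; omega
  rw [hcnt]
  rw [← hdrop]
  rw [← pvCore (xs.drop (min j xs.length))]
  apply List.filterMap_congr
  intro x _
  rw [List.getElem?_drop]
  congr 1

-- interleaving the three permuted streams is pvChunk3
theorem pvZip3 (f g h : List Int → List Int) (kept : List (List Int))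
    (h3 : kept.length % 3 = 0) :
    (((pvSNth kept).map f).zip
        (((pvSNth (kept.drop 1)).map g).zip ((pvSNth (kept.drop 2)).map h))).flatMap
      (fun t => [t.1, t.2.1, t.2.2]) = pvChunk3 f g h kept := by
  match kept with
  | [] => rfl
  | [a] => simp at h3
  | [a, b] => simp at h3
  | a :: b :: c :: rest =>
    have hrest : rest.length % 3 = 0 := by simp at h3; omega
    have e0 : pvSNth (a :: b :: c :: rest) = a :: pvSNth rest := rfl
    have e1 : pvSNth ((a :: b :: c :: rest).drop 1) = b :: pvSNth (rest.drop 1) := by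
      match rest with
      | [] => rfl
      | [x] => rfl
      | x :: y :: r => rfl
    have e2 : pvSNth ((a :: b :: c :: rest).drop 2) = c :: pvSNth (rest.drop 2) := by
      match rest with
      | [] => rfl
      | [x] => rfl
      | x :: y :: r => rfl
    rw [e0, e1, e2]
    simp only [List.map_cons, List.zip_cons_cons, List.flatMap_cons]
    rw [pvZip3 f g h rest hrest]
    rfl

-- the triple-indexed flatMap over the groups is pvChunk3
theorem pvFlatChunk (F G H : List Int → List Int) (q : Nat) (kept : List (List Int))
    (hq : kept.length = 3 * q) :
    (List.range q).flatMap
      (fun x => [F (kept.getD (3 * x) []), G (kept.getD (3 * x + 1) []), H (kept.getD (3 * x + 2) [])]) =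
    pvChunk3 F G H kept := by
  induction q generalizing kept with
  | zero =>
    have : kept = [] := List.eq_nil_of_length_eq_zero (by omega)
    subst this; rfl
  | succ k ih =>
    match kept with
    | [] => simp at hq
    | [a] => simp at hq; omega
    | [a, b] => simp at hq; omega
    | a :: b :: c :: rest =>
      rw [List.range_succ_eq_map, List.flatMap_cons, List.flatMap_map]
      have hrest : rest.length = 3 * k := by simp at hq; omega
      have hsh : List.flatMap
          (fun x => [F ((a :: b :: c :: rest).getD (3 * Nat.succ x) []),
                     G ((a :: b :: c :: rest).getD (3 * Nat.succ x + 1) []),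
                     H ((a :: b :: c :: rest).getD (3 * Nat.succ x + 2) [])])
          (List.range k) = pvChunk3 F G H rest := by
        rw [← ih rest hrest]
        apply List.flatMap_congr
        intro x _
        have g : ∀ (i : Nat), (a :: b :: c :: rest).getD (i + 3) [] = rest.getD i [] :=
          fun i => rfl
        rw [show 3 * Nat.succ x = 3 * x + 3 from by omega]
        rw [show 3 * x + 3 + 1 = (3 * x + 1) + 3 from by omega,
            show 3 * x + 3 + 2 = (3 * x + 2) + 3 from by omega, g, g, g]
      rw [hsh]
      rfl

-- the per-branch foldl of port A is pvChunk3
theorem pvFoldTriple (F G H : List Int → List Int) (kept : List (List Int))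
    (h3 : kept.length % 3 = 0) :
    List.foldl
      (fun acc x =>
        acc ++ [F (PySem.List.pyGetD kept (x*3) [])]
            ++ [G (PySem.List.pyGetD kept (x*3+1) [])]
            ++ [H (PySem.List.pyGetD kept (x*3+2) [])]) []
      (PySem.List.pyRange 0 ((kept.length / 3 : Nat) : Int)) = pvChunk3 F G H kept := by
  rw [PySem.List.pyRange_one]
  have hto : ((kept.length / 3 : Nat) : Int) - 0 = ((kept.length / 3 : Nat) : Int) := by ring
  rw [hto]
  simp only [Int.toNat_natCast, List.foldl_map, zero_add]
  rw [PySem.List.foldl_congr_mem _ _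
      (fun acc k => acc ++ [F (kept.getD (3*k) []), G (kept.getD (3*k+1) []), H (kept.getD (3*k+2) [])]) _
      (by
        intro acc k hk
        have e0 : ((k : Int))*3 = ((3*k : Nat) : Int) := by push_cast; ring
        have e1 : ((k : Int))*3+1 = ((3*k+1 : Nat) : Int) := by push_cast; ring
        have e2 : ((k : Int))*3+2 = ((3*k+2 : Nat) : Int) := by push_cast; ring
        rw [e2, e1, e0, PySem.List.pyGetD_natCast, PySem.List.pyGetD_natCast,
            PySem.List.pyGetD_natCast]
        simp)]
  rw [PySem.List.foldl_append_eq_flatMap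
      (g := fun (k : Nat) => [F (kept.getD (3*k) []), G (kept.getD (3*k+1) []), H (kept.getD (3*k+2) [])])]
  simp only [List.nil_append]
  exact pvFlatChunk F G H (kept.length / 3) kept (by omega)

-- B's deinterleave/permute/zip expression is pvChunk3 of the three picked permutations
theorem pvBSide (rot : Int) (kept : List (List Int)) (hk3 : kept.length % 3 = 0) :
    (let rotated := (PySem.List.pyRange 0 3).map (fun j =>
        ((PySem.List.slice? kept (some j) none 3).getD []).map
          (pvPerm (PySem.Int.mod (j - rot) 3)))
     ((rotated.getD 0 []).zip ((rotated.getD 1 []).zip (rotated.getD 2 []))).flatMap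
        (fun t => [t.1, t.2.1, t.2.2]))
    = pvChunk3 (pvPerm (PySem.Int.mod (0 - rot) 3)) (pvPerm (PySem.Int.mod (1 - rot) 3))
        (pvPerm (PySem.Int.mod (2 - rot) 3)) kept := by
  dsimp only
  have hrange : PySem.List.pyRange 0 3 = [0, 1, 2] := by decide
  rw [hrange]
  simp only [List.map_cons, List.map_nil, List.getD_cons_zero, List.getD_cons_succ]
  have s0 := pvSlice3 kept 0
  have s1 := pvSlice3 kept 1
  have s2 := pvSlice3 kept 2
  norm_num at s0 s1 s2
  rw [s0, s1, s2]
  simp only [Option.getD_some]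
  have hz := pvZip3 (pvPerm (PySem.Int.mod (0 - rot) 3)) (pvPerm (PySem.Int.mod (1 - rot) 3))
      (pvPerm (PySem.Int.mod (2 - rot) 3)) kept hk3
  rw [List.drop_one] at hz
  exact hz

theorem RGB_main (rotationP : Int) (pixels : List (List Int)) :
    RGBrotationForward rotationP pixels = RGBrotationForward_alt rotationP pixels := by
  unfold RGBrotationForward RGBrotationForward_alt
  dsimp only
  rw [pvPairLoop]
  dsimp only
  rw [pvPopLoop, pvAppendLoop, pvSliceFrom, pvSliceTo]
  congr 1
  have hk3 : (pixels.take (pixels.length - pixels.length % 3)).length % 3 = 0 := by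
    simp; omega
  by_cases h0 : rotationP = 0
  · subst h0
    rw [if_pos rfl, if_pos (Or.inl rfl)]
    refine (pvFoldTriple (fun p => p)
        (fun p => [PySem.List.pyGetD p 2 0, PySem.List.pyGetD p 0 0, PySem.List.pyGetD p 1 0])
        (fun p => [PySem.List.pyGetD p 1 0, PySem.List.pyGetD p 2 0, PySem.List.pyGetD p 0 0])
        _ hk3).trans ?_
    refine Eq.trans ?_ (pvBSide 0 _ hk3).symm
    have m0 : PySem.Int.mod ((0 : Int) - 0) 3 = 0 := by decide
    have m1 : PySem.Int.mod ((1 : Int) - 0) 3 = 1 := by decide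
    have m2 : PySem.Int.mod ((2 : Int) - 0) 3 = 2 := by decide
    rw [m0, m1, m2]
    have hF0 : pvPerm (0 : Int) = (fun p => p) := by funext p; simp [pvPerm]
    have hF1 : pvPerm (1 : Int) = (fun p =>
        [PySem.List.pyGetD p 2 0, PySem.List.pyGetD p 0 0, PySem.List.pyGetD p 1 0]) := by
      funext p; norm_num [pvPerm]
    have hF2 : pvPerm (2 : Int) = (fun p =>
        [PySem.List.pyGetD p 1 0, PySem.List.pyGetD p 2 0, PySem.List.pyGetD p 0 0]) := by
      funext p; norm_num [pvPerm]
    rw [hF0, hF1, hF2]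
  · by_cases h1 : rotationP = 1
    · subst h1
      rw [if_neg (by norm_num), if_pos rfl, if_pos (Or.inr (Or.inl rfl))]
      refine (pvFoldTriple
          (fun p => [PySem.List.pyGetD p 1 0, PySem.List.pyGetD p 2 0, PySem.List.pyGetD p 0 0])
          (fun p => p)
          (fun p => [PySem.List.pyGetD p 2 0, PySem.List.pyGetD p 0 0, PySem.List.pyGetD p 1 0])
          _ hk3).trans ?_
      refine Eq.trans ?_ (pvBSide 1 _ hk3).symm
      have m0 : PySem.Int.mod ((0 : Int) - 1) 3 = 2 := by decide
      have m1 : PySem.Int.mod ((1 : Int) - 1) 3 = 0 := by decide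
      have m2 : PySem.Int.mod ((2 : Int) - 1) 3 = 1 := by decide
      rw [m0, m1, m2]
      have hF0 : pvPerm (0 : Int) = (fun p => p) := by funext p; simp [pvPerm]
      have hF1 : pvPerm (1 : Int) = (fun p =>
          [PySem.List.pyGetD p 2 0, PySem.List.pyGetD p 0 0, PySem.List.pyGetD p 1 0]) := by
        funext p; norm_num [pvPerm]
      have hF2 : pvPerm (2 : Int) = (fun p =>
          [PySem.List.pyGetD p 1 0, PySem.List.pyGetD p 2 0, PySem.List.pyGetD p 0 0]) := by
        funext p; norm_num [pvPerm]
      rw [hF0, hF1, hF2]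
    · by_cases h2 : rotationP = 2
      · subst h2
        rw [if_neg (by norm_num), if_neg (by norm_num), if_pos rfl,
            if_pos (Or.inr (Or.inr rfl))]
        refine (pvFoldTriple
            (fun p => [PySem.List.pyGetD p 2 0, PySem.List.pyGetD p 0 0, PySem.List.pyGetD p 1 0])
            (fun p => [PySem.List.pyGetD p 1 0, PySem.List.pyGetD p 2 0, PySem.List.pyGetD p 0 0])
            (fun p => p)
            _ hk3).trans ?_
        refine Eq.trans ?_ (pvBSide 2 _ hk3).symm
        have m0 : PySem.Int.mod ((0 : Int) - 2) 3 = 1 := by decide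
        have m1 : PySem.Int.mod ((1 : Int) - 2) 3 = 2 := by decide
        have m2 : PySem.Int.mod ((2 : Int) - 2) 3 = 0 := by decide
        rw [m0, m1, m2]
        have hF0 : pvPerm (0 : Int) = (fun p => p) := by funext p; simp [pvPerm]
        have hF1 : pvPerm (1 : Int) = (fun p =>
            [PySem.List.pyGetD p 2 0, PySem.List.pyGetD p 0 0, PySem.List.pyGetD p 1 0]) := by
          funext p; norm_num [pvPerm]
        have hF2 : pvPerm (2 : Int) = (fun p =>
            [PySem.List.pyGetD p 1 0, PySem.List.pyGetD p 2 0, PySem.List.pyGetD p 0 0]) := by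
          funext p; norm_num [pvPerm]
        rw [hF0, hF1, hF2]
      · rw [if_neg h0, if_neg h1, if_neg h2,
            if_neg (by rintro (h | h | h) <;> contradiction)]

-- ===== VERDICT (by name: the statement is the Claim_ definition above) =====
theorem RGBrotationForward_spec : Claim_equal_RGBrotationForward := by
  intro rot px _ _
  unfold Spec_RGBrotationForward
  exact RGB_main rot px
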